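-- pv_equiv track=rewrite | github.com/Lamayade/ya-practicum-algorithms | martian-stones.py | count_fit_stones
-- ===== SOURCE A (Python) =====
-- def count_fit_stones(
--         req_count: int,
--         req_seq: list,
--         sam_count: int,
--         sam_seq: list,
-- ):
--     sam_seq_sorted = sorted(sam_seq, reverse=True)
--     req_seq_sorted = sorted(req_seq, reverse=True)
--     happy_clients_count = 0
--     inx = 0
--     while inx < min(len(sam_seq_sorted), len(req_seq_sorted)):
--         if req_seq_sorted[inx] <= sam_seq_sorted[inx]:
--             happy_clients_count += 1
--         else:
--             del req_seq_sorted[inx]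
--             inx -= 1
--         inx += 1
--     return happy_clients_count
-- ===== SOURCE B (Python) =====
-- def count_fit_stones(
--         req_count: int,
--         req_seq: list,
--         sam_count: int,
--         sam_seq: list,
-- ):
--     sam = sorted(sam_seq, reverse=True)
--     k = 0
--     for r in sorted(req_seq, reverse=True):
--         if k < len(sam) and r <= sam[k]:
--             k += 1
--     return k
-- ===== Notes on version B (the rewrite author's own statement) =====
-- stated objective: alternative
-- what changed: Replaced the while-loop that repeatedly deletes elements from the sorted request list by a single pass over the sorted requests with a match counter acting as a pointer into the sorted stones (no list mutation).
import Mathlib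
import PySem

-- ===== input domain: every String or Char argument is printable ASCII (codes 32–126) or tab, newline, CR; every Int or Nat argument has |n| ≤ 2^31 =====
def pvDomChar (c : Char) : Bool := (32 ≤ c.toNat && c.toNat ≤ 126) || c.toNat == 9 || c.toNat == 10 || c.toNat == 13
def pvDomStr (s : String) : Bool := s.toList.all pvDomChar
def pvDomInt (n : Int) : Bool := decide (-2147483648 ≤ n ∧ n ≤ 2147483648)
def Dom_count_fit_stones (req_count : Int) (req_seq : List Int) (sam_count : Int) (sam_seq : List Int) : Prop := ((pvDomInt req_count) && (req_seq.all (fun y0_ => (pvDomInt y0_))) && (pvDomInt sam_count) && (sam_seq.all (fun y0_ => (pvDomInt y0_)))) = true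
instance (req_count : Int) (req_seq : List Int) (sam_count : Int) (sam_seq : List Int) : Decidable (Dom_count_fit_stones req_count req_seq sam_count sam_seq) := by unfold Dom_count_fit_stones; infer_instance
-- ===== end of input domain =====

-- B replaces A's while-loop with in-place deletions by one pass over the sorted requests
-- with a match counter indexing the sorted stones; same return value.

-- ===== PORT A =====
-- A's while loop: state is the (mutated) request list, happy count and index inx.
-- In the else branch Python does `del req[inx]; inx -= 1` and then the shared `inx += 1`,
-- so the net effect is: erase at inx, inx unchanged — ported exactly so.
-- Indices inx are in range of both lists (inx < min of the lengths), so getD matches Python.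
def aLoop (sam : List Int) (req : List Int) (happy : Int) (inx : Nat) : Int :=
  if h : inx < min sam.length req.length then
    if req.getD inx 0 ≤ sam.getD inx 0 then
      aLoop sam req (happy + 1) (inx + 1)
    else
      aLoop sam (req.eraseIdx inx) happy inx
  else happy
termination_by req.length + min sam.length req.length - inx
decreasing_by
  · omega
  · have : inx < req.length := by omega
    simp [List.length_eraseIdx, this]
    omega

def count_fit_stones (req_count : Int) (req_seq : List Int) (sam_count : Int) (sam_seq : List Int) : Int :=
  aLoop (PySem.List.sorted sam_seq (fun x => x) true)
        (PySem.List.sorted req_seq (fun x => x) true) 0 0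

-- ===== PORT B =====
-- B's loop body: `if k < len(sam) and r <= sam[k]: k += 1`
def bStep (sam : List Int) (k : Nat) (r : Int) : Nat :=
  if k < sam.length ∧ r ≤ sam.getD k 0 then k + 1 else k

def count_fit_stones_alt (req_count : Int) (req_seq : List Int) (sam_count : Int) (sam_seq : List Int) : Int :=
  ((PySem.List.sorted req_seq (fun x => x) true).foldl
      (bStep (PySem.List.sorted sam_seq (fun x => x) true)) 0 : Nat)

-- ===== PRECONDITION & SPEC =====
def Spec_count_fit_stones (req_count : Int) (req_seq : List Int) (sam_count : Int) (sam_seq : List Int) (out : Int) : Prop := out = count_fit_stones_alt req_count req_seq sam_count sam_seq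
instance (req_count : Int) (req_seq : List Int) (sam_count : Int) (sam_seq : List Int) (out : Int) : Decidable (Spec_count_fit_stones req_count req_seq sam_count sam_seq out) := by unfold Spec_count_fit_stones; infer_instance

-- ===== CLAIM (what is proved, stated in full; the proofs are below) =====
def Claim_equal_count_fit_stones : Prop := ∀ (req_count : Int) (req_seq : List Int) (sam_count : Int) (sam_seq : List Int), Dom_count_fit_stones req_count req_seq sam_count sam_seq → Spec_count_fit_stones req_count req_seq sam_count sam_seq (count_fit_stones req_count req_seq sam_count sam_seq)

-- ===== LEMMAS AND PROOFS =====

-- once the counter has reached the stone count, B's fold never moves it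
lemma foldl_bStep_saturated (sam : List Int) (l : List Int) (k : Nat)
    (h : sam.length ≤ k) : l.foldl (bStep sam) k = k := by
  induction l with
  | nil => rfl
  | cons r rest ih =>
      have : bStep sam k r = k := by
        simp [bStep]; omega
      simp [List.foldl, this, ih]

-- invariant of A's loop: happy = inx = k, and the unprocessed suffix of the (mutated)
-- request list is what B's fold is about to consume from counter k.
lemma aLoop_eq_foldl (sam : List Int) :
    ∀ (suffix req : List Int) (k : Nat), req.drop k = suffix →
      aLoop sam req (↑k) k = ↑(suffix.foldl (bStep sam) k) := by
  intro suffix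
  induction suffix with
  | nil =>
      intro req k h
      have hlen : req.length ≤ k := by
        simpa [List.drop_eq_nil_iff] using h
      rw [aLoop]
      rw [dif_neg (by omega)]
      rfl
  | cons r rest ih =>
      intro req k h
      have hk : k < req.length := by
        by_contra hc
        simp [List.drop_eq_nil_iff.mpr (by omega : req.length ≤ k)] at h
      have hsome : req[k]? = some r := by
        have := List.getElem?_drop (xs := req) (i := k) (j := 0)
        simp [h] at this
        exact this.symm
      have hget : req.getD k 0 = r := by simp [List.getD, hsome]
      have hdropsucc : req.drop (k + 1) = rest := by
        have h2 := congrArg (List.drop 1) h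
        simpa [List.drop_drop, Nat.add_comm] using h2
      rw [aLoop]
      by_cases hs : k < sam.length
      · rw [dif_pos (by omega)]
        by_cases hle : req.getD k 0 ≤ sam.getD k 0
        · rw [if_pos hle]
          have hb : bStep sam k r = k + 1 := by
            simp only [bStep]; rw [if_pos ⟨hs, hget ▸ hle⟩]
          have := ih req (k + 1) hdropsucc
          simpa [List.foldl, hb] using this
        · rw [if_neg hle]
          have hb : bStep sam k r = k := by
            simp only [bStep]
            rw [if_neg (fun hc => hle (by rw [hget]; exact hc.2))]
          have hdrop' : (req.eraseIdx k).drop k = rest := by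
            have hlt : (req.take k).length = k := by
              simp [List.length_take]; omega
            have hdl := List.drop_left (l₁ := req.take k) (l₂ := req.drop (k + 1))
            rw [hlt] at hdl
            rw [List.eraseIdx_eq_take_drop_succ, hdl, hdropsucc]
          have := ih (req.eraseIdx k) k hdrop'
          simpa [List.foldl, hb] using this
      · rw [dif_neg (by omega)]
        have hb : bStep sam k r = k := by
          simp only [bStep]; rw [if_neg (fun hc => hs hc.1)]
        simp [List.foldl, hb, foldl_bStep_saturated sam rest k (by omega)]

-- ===== VERDICT (by name: the statement is the Claim_ definition above) =====
theorem count_fit_stones_spec : Claim_equal_count_fit_stones := by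
  intro req_count req_seq sam_count sam_seq _
  unfold Spec_count_fit_stones count_fit_stones count_fit_stones_alt
  exact aLoop_eq_foldl _ _ _ 0 rfl
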